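-- pv_equiv track=rewrite | github.com/flexible-atomic-code/fac | fac/python/table.py | pad_text
-- ===== SOURCE A (Python) =====
-- def pad_text(t, p):
--     s = t.split('\n')
--     a = ''
--     for i in range(len(s)):
--         a = a+s[i]
--         if (i < len(s)-1):
--             a = a + '\n' + p
--     return p+a
-- ===== SOURCE B (Python) =====
-- def pad_text(t, p):
--     return p + t.replace('\n', '\n' + p)
-- ===== Notes on version B (the rewrite author's own statement) =====
-- stated objective: idiomatic
-- what changed: Replaces the split-into-lines plus index-loop concatenation with a single string substitution: prepend one prefix and replace every newline with newline-plus-prefix.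
import Mathlib
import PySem

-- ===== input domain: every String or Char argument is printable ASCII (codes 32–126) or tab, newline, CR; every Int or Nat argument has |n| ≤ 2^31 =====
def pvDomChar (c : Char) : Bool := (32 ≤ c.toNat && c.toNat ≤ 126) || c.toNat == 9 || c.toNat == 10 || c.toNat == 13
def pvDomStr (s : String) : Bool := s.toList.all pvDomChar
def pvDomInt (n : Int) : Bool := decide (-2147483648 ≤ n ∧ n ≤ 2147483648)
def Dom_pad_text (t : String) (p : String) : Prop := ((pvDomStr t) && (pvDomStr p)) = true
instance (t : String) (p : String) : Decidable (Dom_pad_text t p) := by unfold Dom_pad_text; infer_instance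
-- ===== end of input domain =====

-- B prefixes every line with a single replace call, p + t.replace('\n', '\n'+p), instead of A's split-into-lines plus index-loop concatenation; objective: idiomatic.

-- ===== PORT A =====
def pad_text (t : String) (p : String) : String :=
  let s : List String := (PySem.Str.split? t "\n").getD []   -- sep is the literal "\n" ≠ "", so split? is `some`
  let a : String :=
    (PySem.List.pyRange 0 (PySem.List.len s)).foldl
      (fun a i =>
        if i < PySem.List.len s - 1 then a ++ PySem.List.pyGetD s i "" ++ "\n" ++ p
        else a ++ PySem.List.pyGetD s i "") ""
      -- 'a = a + s[i]; if i < len(s)-1: a = a + "\n" + p'; i is always in range, so s[i] never raises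
  p ++ a

-- ===== PORT B =====
def pad_text_alt (t : String) (p : String) : String :=
  p ++ PySem.Str.replace t "\n" ("\n" ++ p)

-- ===== PRECONDITION & SPEC =====
def Spec_pad_text (t : String) (p : String) (out : String) : Prop := out = pad_text_alt t p
instance (t : String) (p : String) (out : String) : Decidable (Spec_pad_text t p out) := by unfold Spec_pad_text; infer_instance

-- ===== CLAIM (what is proved, stated in full; the proofs are below) =====
def Claim_equal_pad_text : Prop := ∀ (t : String) (p : String), Dom_pad_text t p → Spec_pad_text t p (pad_text t p)

-- ===== LEMMAS AND PROOFS =====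

-- common characterization: each '\n' in the text becomes '\n' followed by the prefix
def fpad (pl : List Char) : List Char → List Char
  | [] => []
  | c :: r => if c = '\n' then ('\n' :: pl) ++ fpad pl r else c :: fpad pl r

-- B side: Chars.replace with old = ['\n'] computes fpad
theorem replace_go_eq (pl : List Char) (l : List Char) :
    ∀ (fuel : Nat) (acc : List Char), l.length ≤ fuel →
      PySem.Chars.replace.go ['\n'] ('\n' :: pl) fuel l acc = acc.reverse ++ fpad pl l := by
  induction l with
  | nil =>
    intro fuel acc _
    cases fuel <;> simp [PySem.Chars.replace.go, fpad]
  | cons c r ih =>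
    intro fuel acc h
    cases fuel with
    | zero => simp at h
    | succ n =>
      have hn : r.length ≤ n := by simp at h; omega
      by_cases hc : c = '\n'
      · subst hc
        rw [show PySem.Chars.replace.go ['\n'] ('\n' :: pl) (n+1) ('\n' :: r) acc
            = PySem.Chars.replace.go ['\n'] ('\n' :: pl) n (List.drop 1 ('\n'::r)) (('\n'::pl).reverse ++ acc) from by
          simp [PySem.Chars.replace.go, List.isPrefixOf]]
        rw [List.drop_one, List.tail_cons, ih n _ hn]
        simp [fpad]
      · rw [show PySem.Chars.replace.go ['\n'] ('\n' :: pl) (n+1) (c :: r) acc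
            = PySem.Chars.replace.go ['\n'] ('\n' :: pl) n r (c :: acc) from by
          simp [PySem.Chars.replace.go, List.isPrefixOf, Ne.symm hc]]
        rw [ih n _ hn]
        simp [fpad, hc]

theorem replace_eq_fpad (pl tl : List Char) :
    PySem.Chars.replace tl ['\n'] ('\n' :: pl) = fpad pl tl := by
  have h1 : (['\n'] : List Char).isEmpty = false := rfl
  rw [PySem.Chars.replace, h1]
  simp only [Bool.false_eq_true, if_false]
  rw [replace_go_eq pl tl tl.length [] le_rfl]
  simp

-- A side, step 1: splitOn with sep ['\n'] computes this accumulator recursion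
def splitAux : List Char → List Char → List (List Char)
  | cur, [] => [cur.reverse]
  | cur, c :: r => if c = '\n' then cur.reverse :: splitAux [] r else splitAux (c :: cur) r

theorem splitOn_go_eq (l : List Char) :
    ∀ (fuel : Nat) (cur : List Char) (acc : List (List Char)), l.length < fuel →
      PySem.Chars.splitOn.go ['\n'] fuel l cur acc = acc.reverse ++ splitAux cur l := by
  induction l with
  | nil =>
    intro fuel cur acc h
    cases fuel with
    | zero => omega
    | succ n => simp [PySem.Chars.splitOn.go, splitAux]
  | cons c r ih =>
    intro fuel cur acc h
    cases fuel with
    | zero => omega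
    | succ n =>
      have hn : r.length < n := by simp at h; omega
      by_cases hc : c = '\n'
      · subst hc
        rw [show PySem.Chars.splitOn.go ['\n'] (n+1) ('\n' :: r) cur acc
            = PySem.Chars.splitOn.go ['\n'] n (List.drop 1 ('\n'::r)) [] (cur.reverse :: acc) from by
          simp [PySem.Chars.splitOn.go, List.isPrefixOf]]
        rw [List.drop_one, List.tail_cons, ih n _ _ hn]
        simp [splitAux]
      · rw [show PySem.Chars.splitOn.go ['\n'] (n+1) (c :: r) cur acc
            = PySem.Chars.splitOn.go ['\n'] n r (c :: cur) acc from by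
          simp [PySem.Chars.splitOn.go, List.isPrefixOf, Ne.symm hc]]
        rw [ih n _ _ hn]
        simp [splitAux, hc]

theorem splitOn_eq_splitAux (tl : List Char) :
    PySem.Chars.splitOn tl ['\n'] = splitAux [] tl := by
  rw [PySem.Chars.splitOn, splitOn_go_eq tl (tl.length + 1) [] [] (by omega)]
  simp

theorem splitAux_ne_nil (cur l : List Char) : splitAux cur l ≠ [] := by
  induction l generalizing cur with
  | nil => simp [splitAux]
  | cons c r ih => by_cases hc : c = '\n' <;> simp [splitAux, hc, ih]

-- A side, step 2: joining splitAux's pieces with '\n'::pl rebuilds fpad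
theorem intercalate_splitAux (pl : List Char) (l : List Char) :
    ∀ cur, List.intercalate ('\n' :: pl) (splitAux cur l) = cur.reverse ++ fpad pl l := by
  induction l with
  | nil => intro cur; simp [splitAux, fpad, List.intercalate]
  | cons c r ih =>
    intro cur
    by_cases hc : c = '\n'
    · subst hc
      obtain ⟨y, ys, hy⟩ := List.exists_cons_of_ne_nil (splitAux_ne_nil [] r)
      have h0 := ih []
      rw [hy] at h0
      rw [splitAux]
      simp only [if_true, hy]
      rw [show List.intercalate ('\n'::pl) (cur.reverse :: y :: ys)
          = cur.reverse ++ ('\n'::pl) ++ List.intercalate ('\n'::pl) (y :: ys) from by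
        simp [List.intercalate, List.intersperse]]
      rw [h0]
      simp [fpad]
    · rw [splitAux, if_neg hc, ih (c :: cur)]
      simp [fpad, hc]

-- A side, step 3: the index loop over the parts list is intercalation
theorem loop_eq_intercalate (p : String) (parts : List String) :
    ∀ (m k : Nat) (a0 : String), parts.length = k + m →
      ((PySem.List.pyRange (k : Int) (PySem.List.len parts)).foldl
        (fun a i =>
          if i < PySem.List.len parts - 1 then a ++ PySem.List.pyGetD parts i "" ++ "\n" ++ p
          else a ++ PySem.List.pyGetD parts i "") a0).toList
      = a0.toList ++ List.intercalate ('\n' :: p.toList) ((parts.drop k).map String.toList) := by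
  intro m
  induction m with
  | zero =>
    intro k a0 hk
    rw [PySem.List.pyRange_one_eq_nil (by simp [PySem.List.len]; omega)]
    simp [List.drop_eq_nil_of_le (by omega : parts.length ≤ k), List.intercalate]
  | succ m ih =>
    intro k a0 hk
    have hklt : k < parts.length := by omega
    rw [PySem.List.pyRange_one_cons (by simp [PySem.List.len]; exact_mod_cast hklt)]
    simp only [List.foldl_cons]
    have hget : PySem.List.pyGetD parts (k : Int) "" = parts[k] := by
      rw [PySem.List.pyGetD_natCast]; exact List.getD_eq_getElem _ _ hklt
    have hdrop : parts.drop k = parts[k] :: parts.drop (k + 1) :=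
      List.drop_eq_getElem_cons hklt
    have hcast : ((k : Int) + 1) = ((k + 1 : Nat) : Int) := by push_cast; ring
    by_cases hlast : k + 1 = parts.length
    · -- last element: no separator appended, and the remaining range drops nothing
      rw [if_neg (by simp [PySem.List.len]; omega)]
      rw [hcast, ih (k + 1) _ (by omega)]
      simp [hget, hdrop, List.drop_eq_nil_of_le (le_of_eq hlast.symm), List.intercalate]
    · rw [if_pos (by simp [PySem.List.len]; omega)]
      rw [hcast, ih (k + 1) _ (by omega)]
      obtain ⟨y, ys, hy⟩ := List.exists_cons_of_ne_nil
        (l := parts.drop (k + 1)) (by simp; omega)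
      simp [hget, hdrop, hy, List.intercalate]

-- ===== VERDICT (by name: the statement is the Claim_ definition above) =====
theorem pad_text_spec : Claim_equal_pad_text := by
  intro t p _
  unfold Spec_pad_text pad_text pad_text_alt
  apply String.toList_inj.mp
  have hsplit : (PySem.Str.split? t "\n").getD [] =
      (PySem.Chars.splitOn t.toList ['\n']).map String.ofList := by
    simp [PySem.Str.split?, PySem.Chars.split?]
  simp only [hsplit]
  have hloop := loop_eq_intercalate p ((PySem.Chars.splitOn t.toList ['\n']).map String.ofList)
    ((PySem.Chars.splitOn t.toList ['\n']).map String.ofList).length 0 "" (by simp)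
  simp only [Nat.cast_zero] at hloop
  rw [String.toList_append, hloop]
  simp only [List.drop_zero, List.map_map]
  have hmap : ((PySem.Chars.splitOn t.toList ['\n']).map (String.toList ∘ String.ofList))
      = PySem.Chars.splitOn t.toList ['\n'] := by
    simp [Function.comp_def, String.toList_ofList]
  rw [hmap, splitOn_eq_splitAux, intercalate_splitAux]
  simp [PySem.Str.replace, replace_eq_fpad]
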